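-- pv_equiv track=rewrite | github.com/jeongsangsoo/CTF | 2020/csivitu/rev/pydis2ctf/solve.py | reverse_C2
-- ===== SOURCE A (Python) =====
-- def reverse_C2(inpString):
--     xorKey = "S"
--     result = ''
--     for i in range(len(inpString)):
--         result+= chr(ord(inpString[i])^ord(xorKey))
--     st = ''
--     for i in range(len(result)-1,-1,-1):
--         st+=result[i]
--     return st
-- ===== SOURCE B (Python) =====
-- def reverse_C2(inpString):
--     return ''.join(chr(ord(c) ^ ord('S')) for c in reversed(inpString))
-- ===== Notes on version B (the rewrite author's own statement) =====
-- stated objective: simpler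
-- what changed: B fuses A's two passes (XOR pass building an intermediate string, then an index-countdown reversal loop) into one generator over reversed(inpString) joined once, with no intermediate string.
import Mathlib
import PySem

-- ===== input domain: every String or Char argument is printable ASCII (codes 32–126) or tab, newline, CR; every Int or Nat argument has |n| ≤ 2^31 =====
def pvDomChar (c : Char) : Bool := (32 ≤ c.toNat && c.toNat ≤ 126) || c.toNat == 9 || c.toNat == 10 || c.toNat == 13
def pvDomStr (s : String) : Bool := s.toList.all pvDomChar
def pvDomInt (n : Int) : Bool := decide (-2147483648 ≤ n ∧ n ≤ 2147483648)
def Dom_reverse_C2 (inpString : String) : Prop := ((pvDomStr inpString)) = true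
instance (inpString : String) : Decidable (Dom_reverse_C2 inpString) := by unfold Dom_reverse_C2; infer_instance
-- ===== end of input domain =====

-- B fuses A's two passes (XOR then index-countdown reversal) into one pass over the reversed characters; objective: simpler.

-- ===== PORT A =====
-- Two passes, exactly as in the Python: first the XOR loop building `result`,
-- then the countdown loop range(len(result)-1, -1, -1) building `st`.
-- chr(ord(x)^ord('S')) is ported as Char.ofNat (x.toNat ^^^ 83) (exact on the ASCII domain).
def reverse_C2 (inpString : String) : String :=
  let cs := inpString.toList
  let result := (PySem.List.pyRange 0 (cs.length : Int) 1).foldl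
    (fun acc i => acc ++ [Char.ofNat ((PySem.List.pyGetD cs i ' ').toNat ^^^ 83)]) []
  let st := (PySem.List.pyRange ((result.length : Int) - 1) (-1) (-1)).foldl
    (fun acc i => acc ++ [PySem.List.pyGetD result i ' ']) []
  String.mk st

-- ===== PORT B =====
-- single pass over reversed(inpString), XOR fused in, joined once
def reverse_C2_alt (inpString : String) : String :=
  String.mk (inpString.toList.reverse.map (fun c => Char.ofNat (c.toNat ^^^ 83)))

-- ===== PRECONDITION & SPEC =====
def Spec_reverse_C2 (inpString : String) (out : String) : Prop := out = reverse_C2_alt inpString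
instance (inpString : String) (out : String) : Decidable (Spec_reverse_C2 inpString out) := by unfold Spec_reverse_C2; infer_instance

-- ===== CLAIM (what is proved, stated in full; the proofs are below) =====
def Claim_equal_reverse_C2 : Prop := ∀ (inpString : String), Dom_reverse_C2 inpString → Spec_reverse_C2 inpString (reverse_C2 inpString)

-- ===== LEMMAS AND PROOFS =====

-- A's countdown loop range(n-1, -1, -1) with appends reads the list back to front: it is `reverse`.
theorem foldl_countdown_reverse (xs : List Char) :
    (PySem.List.pyRange ((xs.length : Int) - 1) (-1) (-1)).foldl
      (fun acc i => acc ++ [PySem.List.pyGetD xs i ' ']) [] = xs.reverse := by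
  rw [PySem.List.pyRange_neg_one_eq_reverse, PySem.List.foldl_append_singleton_eq_map]
  show ((PySem.List.pyRange 0 ((xs.length : Int) - 1 + 1) 1).reverse.map
      (fun i => PySem.List.pyGetD xs i ' ')) = xs.reverse
  rw [sub_add_cancel, List.map_reverse, PySem.List.map_pyGetD_pyRange_zero']

-- ===== VERDICT (by name: the statement is the Claim_ definition above) =====
theorem reverse_C2_spec : Claim_equal_reverse_C2 := by
  intro s _
  show reverse_C2 s = reverse_C2_alt s
  unfold reverse_C2 reverse_C2_alt
  dsimp only
  rw [foldl_countdown_reverse,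
      PySem.List.foldl_pyRange_zero_pyGetD' s.toList ' '
        (fun acc c => acc ++ [Char.ofNat (c.toNat ^^^ 83)]) [],
      PySem.List.foldl_append_singleton_eq_map, List.nil_append, List.map_reverse]
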